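-- pv_equiv track=rewrite | github.com/sticky-ai/Algorithms | categories/data_structures/arrays/reduceString.py | reduceString
-- ===== SOURCE A (Python) =====
-- def reduceString(inputString):
--     inputString = list(inputString)
--     while True:
--         try:
--             if inputString[0] == inputString[-1] and len(inputString) > 1:
--                 inputString.pop(0)
--                 inputString.pop()
--             else:
--                 return ''.join(inputString) if len(inputString) > 1 else ''
--         except:
--             return ''
-- ===== SOURCE B (Python) =====
-- def reduceString(inputString):
--     i, j = 0, len(inputString) - 1
--     while i < j and inputString[i] == inputString[j]:
--         i += 1
--         j -= 1
--     return inputString[i:j + 1] if j - i >= 1 else ''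
-- ===== Notes on version B (the rewrite author's own statement) =====
-- stated objective: faster
-- what changed: Replaces the repeated pop(0)/pop() rebuilding of the list with two index pointers scanning inward and one final slice.
import Mathlib
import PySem

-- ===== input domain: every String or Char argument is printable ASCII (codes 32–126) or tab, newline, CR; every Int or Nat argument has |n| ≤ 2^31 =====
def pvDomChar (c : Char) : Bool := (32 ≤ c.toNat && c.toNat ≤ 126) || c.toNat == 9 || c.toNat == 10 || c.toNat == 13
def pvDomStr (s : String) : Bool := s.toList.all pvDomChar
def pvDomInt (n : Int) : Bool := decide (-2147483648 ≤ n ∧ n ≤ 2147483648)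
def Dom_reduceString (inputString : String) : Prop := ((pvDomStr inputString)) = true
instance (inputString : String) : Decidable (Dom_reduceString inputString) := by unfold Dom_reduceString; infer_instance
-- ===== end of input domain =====

-- B replaces A's quadratic pop(0)/pop() rebuilding loop by two index pointers moving
-- inward and one final slice (objective: faster).

-- ===== PORT A =====
-- the while-True loop: on [] the indexing inputString[0] raises and the except returns '';
-- otherwise pop(0) is .tail and pop() is .dropLast
def pvReduceLoop (l : List Char) : String :=
  match l with
  | [] => ""                                  -- inputString[0] raises IndexError → except → ''
  | c :: rest =>
    if c = (c :: rest).getLast (by simp) ∧ (c :: rest).length > 1 then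
      pvReduceLoop rest.dropLast              -- pop(0); pop()
    else if (c :: rest).length > 1 then String.ofList (c :: rest) else ""
termination_by l.length
decreasing_by simp [List.length_dropLast]

def reduceString (inputString : String) : String := pvReduceLoop inputString.toList

-- ===== PORT B =====
-- while i < j and inputString[i] == inputString[j]: i += 1; j -= 1
def pvAltLoop (l : List Char) (i j : Int) : Int × Int :=
  if h : i < j ∧ PySem.List.pyGet? l i = PySem.List.pyGet? l j then
    pvAltLoop l (i + 1) (j - 1)
  else (i, j)
termination_by (j - i).toNat
decreasing_by omega

-- return inputString[i:j+1] if j - i >= 1 else ''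
def reduceString_alt (inputString : String) : String :=
  match pvAltLoop inputString.toList 0 ((inputString.toList.length : Int) - 1) with
  | (i, j) =>
    if j - i ≥ 1 then
      String.ofList (PySem.List.slice inputString.toList (some i) (some (j + 1)))
    else ""

-- ===== PRECONDITION & SPEC =====
def Spec_reduceString (inputString : String) (out : String) : Prop := out = reduceString_alt inputString
instance (inputString : String) (out : String) : Decidable (Spec_reduceString inputString out) := by unfold Spec_reduceString; infer_instance

-- ===== CLAIM (what is proved, stated in full; the proofs are below) =====
def Claim_equal_reduceString : Prop := ∀ (inputString : String), Dom_reduceString inputString → Spec_reduceString inputString (reduceString inputString)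

-- ===== LEMMAS AND PROOFS =====

-- the inclusive segment l[i..j] that A's shrinking list equals
def pvSeg (l : List Char) (i j : Nat) : List Char := (l.drop i).take (j + 1 - i)

theorem pvSeg_cons (l : List Char) (i j : Nat) (hij : i ≤ j) (hi : i < l.length) :
    pvSeg l i j = l[i] :: pvSeg l (i + 1) j := by
  unfold pvSeg
  rw [List.drop_eq_getElem_cons hi]
  have : j + 1 - i = (j - i) + 1 := by omega
  rw [this, List.take_succ_cons]
  congr 2
  omega

theorem pvSeg_snoc (l : List Char) (i j : Nat) (hij : i ≤ j) (hj1 : 1 ≤ j) (hj : j < l.length) :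
    pvSeg l i j = pvSeg l i (j - 1) ++ [l[j]] := by
  unfold pvSeg
  have h1 : j + 1 - i = (j - i) + 1 := by omega
  have h2 : (l.drop i)[j - i]? = some l[j] := by
    rw [List.getElem?_drop]
    have : i + (j - i) = j := by omega
    rw [this, List.getElem?_eq_getElem hj]
  rw [h1, List.take_add_one, h2, show j - 1 + 1 - i = j - i by omega]
  simp

theorem pvSeg_length (l : List Char) (i j : Nat) (hj : j < l.length) :
    (pvSeg l i j).length = j + 1 - i := by
  unfold pvSeg
  rw [List.length_take, List.length_drop]
  omega

theorem pvMain (l : List Char) (i j : Nat) (hj : j < l.length) :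
    pvReduceLoop (pvSeg l i j) =
      (if (pvAltLoop l (i : Int) (j : Int)).2 - (pvAltLoop l (i : Int) (j : Int)).1 ≥ 1 then
        String.ofList (PySem.List.slice l (some (pvAltLoop l (i : Int) (j : Int)).1)
          (some ((pvAltLoop l (i : Int) (j : Int)).2 + 1)))
      else "") := by
  rcases Nat.lt_trichotomy j i with hlt | heq | hgt
  · -- j < i : segment empty, loop exits immediately
    have hseg : pvSeg l i j = [] := by unfold pvSeg; simp; omega
    rw [hseg]
    rw [pvAltLoop]
    simp only [dif_neg (by omega : ¬ ((i:Int) < (j:Int) ∧ PySem.List.pyGet? l i = PySem.List.pyGet? l j))]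
    rw [pvReduceLoop]
    rw [if_neg (by omega)]
  · -- i = j : singleton segment
    subst heq
    have hseg : pvSeg l j j = [l[j]] := by
      unfold pvSeg
      rw [show j + 1 - j = 1 by omega]
      exact List.take_one_drop_eq_of_lt_length hj
    rw [hseg, pvAltLoop]
    rw [dif_neg (by simp)]
    rw [pvReduceLoop]
    simp
  · -- i < j
    have hi : i < l.length := by omega
    have hcons := pvSeg_cons l i j (by omega) hi
    have hsnoc : pvSeg l (i+1) j = pvSeg l (i+1) (j-1) ++ [l[j]] := by
      have := pvSeg_snoc l (i+1) j (by omega) (by omega) hj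
      exact this
    have hlast : (l[i] :: pvSeg l (i+1) j).getLast (by simp) = l[j] := by
      have h1 : (l[i] :: pvSeg l (i+1) j).getLast? = some l[j] := by
        rw [hsnoc, ← List.cons_append, List.getLast?_concat]
      have h2 := List.getLast?_eq_some_getLast (l := l[i] :: pvSeg l (i+1) j) (by simp)
      rw [h2] at h1
      exact Option.some_injective _ h1
    have hlen : (l[i] :: pvSeg l (i+1) j).length > 1 := by
      simp [pvSeg_length l (i+1) j hj]; omega
    have hget : PySem.List.pyGet? l (i : Int) = some l[i] ∧ PySem.List.pyGet? l (j : Int) = some l[j] := by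
      constructor <;> rw [PySem.List.pyGet?_natCast] <;> simp [hi, hj]
    by_cases hc : l[i] = l[j]
    · -- matching ends: both loops step
      rw [hcons, pvReduceLoop]
      rw [if_pos ⟨by rw [hlast]; exact hc, hlen⟩]
      have hdrop : (pvSeg l (i+1) j).dropLast = pvSeg l (i+1) (j-1) := by
        rw [hsnoc]; simp
      rw [hdrop]
      rw [pvAltLoop]
      rw [dif_pos ⟨by omega, by rw [hget.1, hget.2, hc]⟩]
      have e1 : (i : Int) + 1 = ((i + 1 : Nat) : Int) := by push_cast; ring
      have e2 : (j : Int) - 1 = ((j - 1 : Nat) : Int) := by push_cast [Nat.cast_sub (by omega : 1 ≤ j)]; ring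
      rw [e1, e2]
      exact pvMain l (i+1) (j-1) (by omega)
    · -- unequal ends: both loops stop here
      rw [hcons, pvReduceLoop]
      rw [if_neg (by rw [hlast]; tauto)]
      rw [if_pos hlen]
      rw [pvAltLoop]
      rw [dif_neg (by rw [hget.1, hget.2]; simp; intro _; exact hc)]
      simp only []
      rw [if_pos (by omega : ((i:Int), (j:Int)).2 - ((i:Int), (j:Int)).1 ≥ 1)]
      have : ((j : Int)) + 1 = ((j + 1 : Nat) : Int) := by push_cast; ring
      rw [this, PySem.List.slice_natCast]
      rw [← hcons]
      unfold pvSeg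
      rfl
termination_by j + 1 - i
decreasing_by omega

theorem reduceString_spec : Claim_equal_reduceString := by
  intro s _
  unfold Spec_reduceString reduceString reduceString_alt
  by_cases h0 : s.toList = []
  · simp [h0, pvReduceLoop, pvAltLoop]
  · have hlen : 0 < s.toList.length := List.length_pos_of_ne_nil h0
    have hseg : pvSeg s.toList 0 (s.toList.length - 1) = s.toList := by
      unfold pvSeg
      simp only [List.drop_zero, Nat.sub_zero]
      rw [show s.toList.length - 1 + 1 = s.toList.length by omega, List.take_length]
    have hcast : ((s.toList.length : Int) - 1) = (((s.toList.length - 1 : Nat)) : Int) := by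
      push_cast [Nat.cast_sub (by omega : 1 ≤ s.toList.length)]; ring
    have hm := pvMain s.toList 0 (s.toList.length - 1) (by omega)
    simp only [Nat.cast_zero] at hm
    rw [hseg] at hm
    rw [hcast]
    exact hm
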